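-- pv_equiv track=rewrite | github.com/GH-X-ST/Nausicaa | 02_Glider_Design/debug_nlp.py | _extract_useful_hint
-- ===== SOURCE A (Python) =====
-- def _extract_useful_hint(error_text: str) -> str:
--     """Extract the most actionable IPOPT/CasADi hint from an exception string."""
--     lines = [ln.strip() for ln in error_text.splitlines() if ln.strip()]
--     needles = (
--         "NaN detected",
--         "Inf detected",
--         "Invalid number",
--         "Error in Function",
--         "Evaluation error",
--         "return_status",
--     )
--     for needle in needles:
--         for ln in lines:
--             if needle in ln:
--                 return ln
--     return lines[-1] if lines else error_text
-- ===== SOURCE B (Python) =====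
-- def _extract_useful_hint(error_text: str) -> str:
--     """Extract the most actionable IPOPT/CasADi hint from an exception string."""
--     lines = [ln.strip() for ln in error_text.splitlines() if ln.strip()]
--     needles = (
--         "NaN detected",
--         "Inf detected",
--         "Invalid number",
--         "Error in Function",
--         "Evaluation error",
--         "return_status",
--     )
--     best = None  # (needle index, line); earliest line among the smallest index wins
--     for ln in lines:
--         for i, needle in enumerate(needles):
--             if needle in ln:
--                 if best is None or i < best[0]:
--                     best = (i, ln)
--                 break
--     if best is not None:
--         return best[1]
--     return lines[-1] if lines else error_text
-- ===== Notes on version B (the rewrite author's own statement) =====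
-- stated objective: alternative
-- what changed: Inverts the loop nesting: instead of scanning all lines once per needle in priority order with an early return, B makes one pass over the lines, computing each line's first matching needle index and keeping a running best (min index, earliest line) pair.
import Mathlib
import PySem

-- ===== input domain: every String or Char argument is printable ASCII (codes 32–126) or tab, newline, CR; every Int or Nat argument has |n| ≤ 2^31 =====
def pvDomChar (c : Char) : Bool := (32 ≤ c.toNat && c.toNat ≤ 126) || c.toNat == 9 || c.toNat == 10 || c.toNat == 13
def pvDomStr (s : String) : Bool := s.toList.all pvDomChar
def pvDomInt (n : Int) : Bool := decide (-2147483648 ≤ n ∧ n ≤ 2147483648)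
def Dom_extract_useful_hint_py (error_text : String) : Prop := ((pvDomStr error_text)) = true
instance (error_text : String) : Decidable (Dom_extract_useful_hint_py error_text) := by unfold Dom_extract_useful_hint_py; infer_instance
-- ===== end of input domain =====

-- B replaces A's needle-priority outer loop (6 scans of the lines) by ONE pass over the lines
-- maintaining the best (smallest needle index, earliest line) pair; same return value everywhere.

-- shared by both ports: the needle tuple and the stripped non-empty lines (both Pythons build them identically)
def pvNeedles : List String :=
  ["NaN detected", "Inf detected", "Invalid number",
   "Error in Function", "Evaluation error", "return_status"]

def pvLines (error_text : String) : List String :=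
  (PySem.Str.splitlines error_text).filterMap (fun ln =>
    let s := PySem.Str.strip ln
    if s ≠ "" then some s else none)

-- ===== PORT A =====
-- for needle in needles: for ln in lines: if needle in ln: return ln  — nested loops with early return
def extract_useful_hint_py (error_text : String) : String :=
  match pvNeedles.findSome? (fun needle => (pvLines error_text).find? (fun ln => PySem.Str.isIn needle ln)) with
  | some ln => ln
  | none =>
    match (pvLines error_text).getLast? with
    | some l => l
    | none => error_text

-- ===== PORT B =====
-- one fold over the lines; per line the first matching needle index (inner enumerate+break = findIdx?),
-- accumulator updated only on a strictly smaller index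
def pvBestStep (best : Option (Nat × String)) (ln : String) : Option (Nat × String) :=
  match pvNeedles.findIdx? (fun needle => PySem.Str.isIn needle ln) with
  | none => best
  | some i =>
    match best with
    | none => some (i, ln)
    | some (bi, _) => if i < bi then some (i, ln) else best

def extract_useful_hint_py_alt (error_text : String) : String :=
  match (pvLines error_text).foldl pvBestStep none with
  | some (_, ln) => ln
  | none =>
    match (pvLines error_text).getLast? with
    | some l => l
    | none => error_text

-- ===== PRECONDITION & SPEC =====
def Spec_extract_useful_hint_py (error_text : String) (out : String) : Prop := out = extract_useful_hint_py_alt error_text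
instance (error_text : String) (out : String) : Decidable (Spec_extract_useful_hint_py error_text out) := by unfold Spec_extract_useful_hint_py; infer_instance

-- ===== CLAIM (what is proved, stated in full; the proofs are below) =====
def Claim_equal_extract_useful_hint_py : Prop := ∀ (error_text : String), Dom_extract_useful_hint_py error_text → Spec_extract_useful_hint_py error_text (extract_useful_hint_py error_text)

-- ===== LEMMAS AND PROOFS =====

-- generalized step over an arbitrary needle list
def gStep (ns : List String) (best : Option (Nat × String)) (ln : String) : Option (Nat × String) :=
  match ns.findIdx? (fun needle => PySem.Str.isIn needle ln) with
  | none => best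
  | some i =>
    match best with
    | none => some (i, ln)
    | some (bi, _) => if i < bi then some (i, ln) else best

theorem pvBestStep_eq_gStep : pvBestStep = gStep pvNeedles := rfl

-- once the accumulator holds index 0 it never changes
theorem fold_keep_zero (nd : String) (ns ls : List String) (ln0 : String) :
    ls.foldl (gStep (nd :: ns)) (some (0, ln0)) = some (0, ln0) := by
  induction ls with
  | nil => rfl
  | cons x xs ih =>
    simp only [List.foldl_cons]
    have : gStep (nd :: ns) (some (0, ln0)) x = some (0, ln0) := by
      unfold gStep
      cases h : (nd :: ns).findIdx? (fun needle => PySem.Str.isIn needle x) with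
      | none => rfl
      | some i => simp
    rw [this, ih]

-- lines not containing nd have index ≥ 1 under (nd :: ns)
theorem findIdx?_cons_of_not (nd : String) (ns : List String) (ln : String)
    (h : PySem.Str.isIn nd ln = false) :
    (nd :: ns).findIdx? (fun needle => PySem.Str.isIn needle ln)
      = (ns.findIdx? (fun needle => PySem.Str.isIn needle ln)).map (· + 1) := by
  have h' : PySem.Chars.isIn nd.toList ln.toList = false := by simpa using h
  rw [List.findIdx?_cons]
  simp [h']

-- shift invariant: if no line of ls contains nd, folding under (nd :: ns) from a shifted
-- accumulator is the shift of folding under ns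
def pvShift (a : Option (Nat × String)) : Option (Nat × String) :=
  a.map (fun p => (p.1 + 1, p.2))

theorem fold_shift (nd : String) (ns : List String) (ls : List String)
    (h : ∀ x ∈ ls, PySem.Str.isIn nd x = false) (acc : Option (Nat × String)) :
    ls.foldl (gStep (nd :: ns)) (pvShift acc) = pvShift (ls.foldl (gStep ns) acc) := by
  induction ls generalizing acc with
  | nil => rfl
  | cons x xs ih =>
    have hx : PySem.Str.isIn nd x = false := h x (by simp)
    have hxs : ∀ y ∈ xs, PySem.Str.isIn nd y = false := fun y hy => h y (by simp [hy])
    simp only [List.foldl_cons]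
    have : gStep (nd :: ns) (pvShift acc) x = pvShift (gStep ns acc x) := by
      unfold gStep
      rw [findIdx?_cons_of_not nd ns x hx]
      cases hi : ns.findIdx? (fun needle => PySem.Str.isIn needle x) with
      | none => simp
      | some i =>
        cases acc with
        | none => simp [pvShift]
        | some p =>
          rcases p with ⟨bi, bln⟩
          by_cases hlt : i < bi <;> simp [pvShift, hlt]
    rw [this, ih hxs]

-- if nd occurs in some line, the fold under (nd :: ns) ends at (0, first such line)
theorem fold_found (nd : String) (ns : List String) (l1 : List String) (ln0 : String)
    (l2 : List String) (h1 : ∀ x ∈ l1, PySem.Str.isIn nd x = false)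
    (h0 : PySem.Str.isIn nd ln0 = true) :
    (l1 ++ ln0 :: l2).foldl (gStep (nd :: ns)) none = some (0, ln0) := by
  rw [List.foldl_append]
  have hpre : l1.foldl (gStep (nd :: ns)) none = pvShift (l1.foldl (gStep ns) none) := by
    have := fold_shift nd ns l1 h1 none
    simpa [pvShift] using this
  rw [hpre, List.foldl_cons]
  have hstep : gStep (nd :: ns) (pvShift (l1.foldl (gStep ns) none)) ln0 = some (0, ln0) := by
    have h0' : PySem.Chars.isIn nd.toList ln0.toList = true := by simpa using h0
    have hidx : (nd :: ns).findIdx? (fun needle => PySem.Str.isIn needle ln0) = some 0 := by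
      rw [List.findIdx?_cons]; simp [h0']
    cases hfold : l1.foldl (gStep ns) none with
    | none => simp only [gStep]; rw [hidx]; rfl
    | some p => simp only [gStep]; rw [hidx]; simp [pvShift]
  rw [hstep, fold_keep_zero]

-- the central equivalence of the two loop structures
theorem main_lemma (ns ls : List String) :
    ns.findSome? (fun needle => ls.find? (fun ln => PySem.Str.isIn needle ln))
      = (ls.foldl (gStep ns) none).map Prod.snd := by
  induction ns generalizing ls with
  | nil =>
    have : ls.foldl (gStep []) none = none := by
      induction ls with
      | nil => rfl
      | cons x xs ih => simpa [gStep] using ih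
    simp [this]
  | cons nd ns ih =>
    rw [List.findSome?_cons]
    cases hf : ls.find? (fun ln => PySem.Str.isIn nd ln) with
    | some ln0 =>
      obtain ⟨h0, l1, l2, hls, h1⟩ := List.find?_eq_some_iff_append.mp hf
      subst hls
      have h1' : ∀ x ∈ l1, PySem.Str.isIn nd x = false := by
        intro x hx; simpa using h1 x hx
      rw [fold_found nd ns l1 ln0 l2 h1' h0]
      rfl
    | none =>
      have hall : ∀ x ∈ ls, PySem.Str.isIn nd x = false := by
        intro x hx
        have := List.find?_eq_none.mp hf x hx
        simpa using this
      have := fold_shift nd ns ls hall none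
      simp only [pvShift, Option.map_none] at this
      rw [this, ih ls]
      cases ls.foldl (gStep ns) none with
      | none => rfl
      | some p => simp

-- ===== VERDICT (by name: the statement is the Claim_ definition above) =====
theorem extract_useful_hint_py_spec : Claim_equal_extract_useful_hint_py := by
  intro error_text _
  unfold Spec_extract_useful_hint_py extract_useful_hint_py extract_useful_hint_py_alt
  rw [pvBestStep_eq_gStep, main_lemma pvNeedles (pvLines error_text)]
  cases (pvLines error_text).foldl (gStep pvNeedles) none with
  | none => rfl
  | some p => rfl
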